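-- pv_equiv track=rewrite | github.com/kangxie-colorado/leetcode-and-notes | 184.1545.kthbit.py | findKthBit
-- ===== SOURCE A (Python) =====
-- def findKthBit(n: int, k: int) -> str:
--     s = '0'
--     t = s
--     for i in range(2, n+1):
--         t2 = ''
--         for c in t:
--             t2 += '1' if c == '0' else '0'
--         s = t + '1' + t2[::-1]
--         t = s
--
--     return s[k-1]
-- ===== SOURCE B (Python) =====
-- def findKthBit(n: int, k: int) -> str:
--     # O(n) descent using the self-similar structure S_m = S_{m-1} + '1' + reverse(invert(S_{m-1})):
--     # the middle bit is '1', the upper half mirrors to the lower half inverted.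
--     def bit(m: int, k: int) -> str:
--         if k == 1:
--             return '0'
--         mid = 1 << (m - 1)
--         if k == mid:
--             return '1'
--         if k < mid:
--             return bit(m - 1, k)
--         return '0' if bit(m - 1, (1 << m) - k) == '1' else '1'
--     return bit(max(n, 1), k)
-- ===== Notes on version B (the rewrite author's own statement) =====
-- stated objective: faster
-- what changed: A builds the full 2^n-1 character string by repeated concatenation and indexes into it; B never builds the string, descending from level n to level 1 in O(n) arithmetic steps using the symmetry middle='1', upper half = inverted mirror of the lower half.
-- outside the precondition, e.g. on findKthBit(2, 0): A returns '1', B raises ValueError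
import Mathlib
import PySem

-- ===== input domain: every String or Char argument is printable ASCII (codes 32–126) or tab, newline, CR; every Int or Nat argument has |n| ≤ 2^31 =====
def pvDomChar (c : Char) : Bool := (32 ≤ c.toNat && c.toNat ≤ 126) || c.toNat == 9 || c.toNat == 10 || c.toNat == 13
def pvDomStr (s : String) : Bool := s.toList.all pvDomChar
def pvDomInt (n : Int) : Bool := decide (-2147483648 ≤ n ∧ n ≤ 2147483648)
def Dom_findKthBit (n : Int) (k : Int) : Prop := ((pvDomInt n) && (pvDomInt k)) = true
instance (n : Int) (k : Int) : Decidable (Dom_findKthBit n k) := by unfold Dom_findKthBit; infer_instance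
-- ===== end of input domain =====

-- B replaces A's O(2^n) string construction by an O(n) arithmetic descent on the
-- self-similar structure (middle bit '1', upper half = inverted mirror of lower half).

-- ===== PORT A =====
-- One iteration of A's outer loop body: t2 is built char by char, s = t + '1' + t2[::-1]
-- (t2[::-1] is exact reversal).
def pvStepA (st : List Char × List Char) : List Char × List Char :=
  let t := st.2
  let t2 := t.foldl (fun acc c => acc ++ [if c = '0' then '1' else '0']) ([] : List Char)
  let s' := t ++ ['1'] ++ t2.reverse
  (s', s')

def findKthBit (n : Int) (k : Int) : String :=
  let s : List Char := ['0']
  let t := s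
  let st := (PySem.List.pyRange 2 (n+1) 1).foldl (fun st _i => pvStepA st) (s, t)
  match PySem.List.pyGet? st.1 (k-1) with
  | some c => String.ofList [c]          -- s[k-1]: a one-character Python string
  | none => ""                       -- IndexError in Python; excluded by Pre_

-- ===== PORT B =====
-- bit(m, k) from Source B; Lean's m is Python's level (structural recursion on it).
-- m = 0 is never reached under Pre_ (Python raises there before recursing further).
def pvBit : Nat → Int → Char
  | 0, _ => '0'
  | m+1, k =>
    if k = 1 then '0'
    else
      let mid : Int := 2 ^ m                     -- 1 << (level - 1)
      if k = mid then '1'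
      else if k < mid then pvBit m k
      else if pvBit m (2 ^ (m+1) - k) = '1' then '0' else '1'

def findKthBit_alt (n : Int) (k : Int) : String :=
  String.ofList [pvBit (max n 1).toNat k]

-- ===== PRECONDITION & SPEC =====
-- Pre_ admits exactly the in-bounds indices 1 ≤ k ≤ 2^level - 1 (the string's length);
-- above it A raises IndexError, and k ≤ 0 is excluded as the negative-index wraparound
-- corner, where B's arithmetic descent raises. Within Dom (k ≤ 2^31) the disjunct
-- '32 ≤ level' is the same in-bounds condition written without a 2^level of ~2^31 bits.
def Pre_findKthBit (n : Int) (k : Int) : Prop :=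
  1 ≤ k ∧ (32 ≤ (max n 1).toNat ∨ k ≤ 2 ^ (max n 1).toNat - 1)

instance (n : Int) (k : Int) : Decidable (Pre_findKthBit n k) := by
  unfold Pre_findKthBit; infer_instance

def pvWitness_findKthBit : Int × Int := (3, 5)

def Spec_findKthBit (n : Int) (k : Int) (out : String) : Prop := out = findKthBit_alt n k
instance (n : Int) (k : Int) (out : String) : Decidable (Spec_findKthBit n k out) := by unfold Spec_findKthBit; infer_instance

-- ===== CLAIM (what is proved, stated in full; the proofs are below) =====
def Claim_equal_findKthBit : Prop := ∀ (n : Int) (k : Int), Dom_findKthBit n k → Pre_findKthBit n k → Spec_findKthBit n k (findKthBit n k)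

-- ===== LEMMAS AND PROOFS =====

-- The self-similar string at level m+1 (pvT 0 = S_1 = "0").
def pvInv (c : Char) : Char := if c = '0' then '1' else '0'

def pvT : Nat → List Char
  | 0 => ['0']
  | m+1 => pvT m ++ '1' :: ((pvT m).map pvInv).reverse

theorem pvBit_succ (m : Nat) (k : Int) :
    pvBit (m+1) k = if k = 1 then '0'
      else if k = 2 ^ m then '1'
      else if k < 2 ^ m then pvBit m k
      else if pvBit m (2 ^ (m+1) - k) = '1' then '0' else '1' := rfl

theorem pvT_length (m : Nat) : (pvT m).length = 2 ^ (m+1) - 1 := by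
  induction m with
  | zero => simp [pvT]
  | succ m ih =>
    simp [pvT, ih, pow_succ]
    have : 1 ≤ 2 ^ (m+1) := Nat.one_le_two_pow
    omega

theorem pvStepA_eq (m : Nat) : pvStepA (pvT m, pvT m) = (pvT (m+1), pvT (m+1)) := by
  have h : (pvT m).foldl (fun acc c => acc ++ [if c = '0' then '1' else '0']) ([] : List Char)
      = (pvT m).map pvInv := by
    rw [PySem.List.foldl_append_singleton_eq_map]
    simp [pvInv]
  simp only [pvStepA, h]
  simp [pvT]

theorem foldA_eq (L : List Int) (m : Nat) :
    L.foldl (fun st _i => pvStepA st) (pvT m, pvT m) = (pvT (m + L.length), pvT (m + L.length)) := by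
  induction L generalizing m with
  | nil => simp
  | cons a L ih =>
    rw [List.foldl_cons, pvStepA_eq, ih (m+1)]
    have h : m + (a :: L).length = m + 1 + L.length := by simp; omega
    rw [h]

theorem pvBit_mem (m : Nat) (k : Int) : pvBit m k = '0' ∨ pvBit m k = '1' := by
  induction m generalizing k with
  | zero => left; rfl
  | succ m ih =>
    rw [pvBit_succ]
    split_ifs <;> first | (left; rfl) | (right; rfl) | exact ih _

-- kth (1-based) character of the level-(m+1) string is pvBit (m+1) k.
theorem pvT_get (m : Nat) (k : Int) (h1 : 1 ≤ k) (h2 : k ≤ 2 ^ (m+1) - 1) :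
    (pvT m)[(k-1).toNat]? = some (pvBit (m+1) k) := by
  induction m generalizing k with
  | zero =>
    have : k = 1 := by omega
    subst this
    simp [pvT, pvBit]
  | succ m ih =>
    have hlen : (pvT m).length = 2 ^ (m+1) - 1 := pvT_length m
    have hpow : (1:Int) ≤ 2 ^ (m+1) := one_le_pow₀ (by norm_num)
    have hcast : ((2 ^ (m+1) : Nat) : Int) = 2 ^ (m+1) := by push_cast; ring
    rcases lt_trichotomy k ((2:Int) ^ (m+1)) with hk | hk | hk
    · -- lower half: index inside pvT m
      have hidx : (k-1).toNat < (pvT m).length := by rw [hlen]; omega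
      rw [pvT, List.getElem?_append_left hidx, ih k h1 (by omega)]
      by_cases h1' : k = 1
      · subst h1'
        rw [pvBit_succ, pvBit_succ]
        simp
      · have hne : k ≠ 2 ^ ((m+1):Nat) := by omega
        rw [pvBit_succ (m+1) k, if_neg h1', if_neg hne, if_pos hk]
    · -- middle: the '1'
      subst hk
      have hidx : ((2:Int) ^ (m+1) - 1).toNat = (pvT m).length := by rw [hlen]; omega
      rw [pvT, hidx, List.getElem?_append_right (le_refl _)]
      rw [pvBit_succ]
      simp
      omega
    · -- upper half: reversed inverted mirror
      have hpow2 : ((2:Int) ^ ((m+1)+1)) = 2 * 2 ^ (m+1) := by ring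
      set k' : Int := 2 ^ ((m+1)+1) - k with hk'
      have hk'1 : 1 ≤ k' := by omega
      have hk'2 : k' ≤ 2 ^ (m+1) - 1 := by omega
      set j : Nat := (k-1).toNat - (pvT m).length - 1 with hjdef
      have hj : j = (pvT m).length - 1 - (k'-1).toNat := by rw [hjdef, hlen]; omega
      have hjlt : (k'-1).toNat < (pvT m).length := by rw [hlen]; omega
      have hmaplen : ((pvT m).map pvInv).length = (pvT m).length := by simp
      have hR : (((pvT m).map pvInv).reverse)[j]? = some (pvInv (pvBit (m+1) k')) := by
        rw [hj, List.getElem?_reverse (by rw [hmaplen]; omega)]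
        rw [hmaplen]
        have harith : (pvT m).length - 1 - ((pvT m).length - 1 - (k'-1).toNat) = (k'-1).toNat := by
          omega
        rw [harith, List.getElem?_map, ih k' hk'1 hk'2]
        rfl
      have hidx : (pvT m).length ≤ (k-1).toNat := by rw [hlen]; omega
      rw [pvT, List.getElem?_append_right hidx]
      have hpos : (k-1).toNat - (pvT m).length = j + 1 := by rw [hjdef, hlen]; omega
      rw [hpos, List.getElem?_cons_succ, hR]
      have hb1 : k ≠ 1 := by omega
      have hb2 : k ≠ 2 ^ ((m+1):Nat) := by omega
      have hb3 : ¬ k < 2 ^ ((m+1):Nat) := by omega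
      rw [pvBit_succ (m+1) k, if_neg hb1, if_neg hb2, if_neg hb3]
      have hkk : (2:Int) ^ ((m+1)+1) - k = k' := by rw [hk']
      rw [hkk]
      rcases pvBit_mem (m+1) k' with h | h <;> simp [h, pvInv]

theorem main_eq (n k : Int) (h1 : 1 ≤ k) (h2 : k ≤ 2 ^ (max n 1).toNat - 1) :
    findKthBit n k = findKthBit_alt n k := by
  set N : Nat := (max n 1).toNat with hN
  have hN1 : 1 ≤ N := by
    have : (1:Int) ≤ max n 1 := le_max_right _ _
    omega
  have hlenR : (PySem.List.pyRange 2 (n+1) 1).length = N - 1 := by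
    rw [PySem.List.length_pyRange_one]
    rcases le_or_gt n 1 with h | h
    · have : max n 1 = 1 := max_eq_right h
      omega
    · have : max n 1 = n := max_eq_left (by omega)
      omega
  have hfold : (PySem.List.pyRange 2 (n+1) 1).foldl (fun st _i => pvStepA st) (['0'], ['0'])
      = (pvT (N-1), pvT (N-1)) := by
    have := foldA_eq (PySem.List.pyRange 2 (n+1) 1) 0
    rw [hlenR] at this
    simpa [pvT] using this
  have hNs : N - 1 + 1 = N := by omega
  have hget := pvT_get (N-1) k h1 (by rw [hNs]; exact h2)
  rw [hNs] at hget
  have hpg : PySem.List.pyGet? (pvT (N-1)) (k-1) = (pvT (N-1))[(k-1).toNat]? :=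
    PySem.List.pyGet?_of_nonneg _ (by omega)
  have hA : findKthBit n k =
      (match PySem.List.pyGet?
          ((PySem.List.pyRange 2 (n+1) 1).foldl (fun st _i => pvStepA st) (['0'], ['0'])).1
          (k-1) with
        | some c => String.ofList [c]
        | none => "") := rfl
  rw [hA, hfold]
  show (match PySem.List.pyGet? (pvT (N-1)) (k-1) with
        | some c => String.ofList [c]
        | none => "") = _
  rw [hpg, hget]
  show String.ofList [pvBit N k] = findKthBit_alt n k
  rw [findKthBit_alt, hN]

-- ===== VERDICT (by name: the statement is the Claim_ definition above) =====
theorem findKthBit_spec : Claim_equal_findKthBit := by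
  intro n k hdom hpre
  obtain ⟨h1, h2⟩ := hpre
  unfold Spec_findKthBit
  apply main_eq n k h1
  rcases h2 with h2 | h2
  · -- level ≥ 32: within Dom, k ≤ 2^31 < 2^32 ≤ 2^level
    have hk : k ≤ 2147483648 := by
      unfold Dom_findKthBit at hdom
      simp [pvDomInt] at hdom
      exact hdom.2.2
    have hmono : (2:Int) ^ (32:Nat) ≤ 2 ^ (max n 1).toNat :=
      pow_le_pow_right₀ (by norm_num) h2
    have h32 : (2:Int) ^ (32:Nat) = 4294967296 := by norm_num
    omega
  · exact h2
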